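-- pv_equiv track=rewrite | github.com/MarioPasc/MenGrowth | scripts/generate_thesis_data.py | _resolve_modality
-- ===== SOURCE A (Python) =====
-- MODALITY_SYNONYMS = {
--     "t2f": ["FLAIR", "flair", "Flair", "T2-FLAIR", "T2flair"],
--     "t1n": ["T1pre", "T1-pre", "T1SIN", "T1sin"],
--     "t1c": ["T1ce", "T1-ce", "T1post", "T1-post", "T1"],
--     "t2w": ["T2", "t2", "T2-weighted"],
--     "swi": ["SWI", "swi", "Swi", "SUSC"],
--     "dwi": ["DWI", "dwi", "DIFUSION1", "DIFUSION2", "DIFUSION3", "Diffusion"],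
--     "adc": ["ADC", "adc"],
--     "ct": ["TC", "Ct", "ct", "TOMOGRAFIA"],
-- }
--
-- def _resolve_modality(name: str) -> str:
--     """Resolve a modality name to its canonical form."""
--     name_lower = name.lower().strip()
--     # Direct match
--     if name_lower in MODALITY_SYNONYMS:
--         return name_lower
--     # Check all synonym lists
--     for canonical, synonyms in MODALITY_SYNONYMS.items():
--         for syn in synonyms:
--             if syn.lower() == name_lower:
--                 return canonical
--     # Check compound names with orientation suffixes
--     for canonical in MODALITY_SYNONYMS:
--         if name_lower.startswith(canonical):
--             return canonical
--     return name_lower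
-- ===== SOURCE B (Python) =====
-- MODALITY_SYNONYMS = {
--     "t2f": ["FLAIR", "flair", "Flair", "T2-FLAIR", "T2flair"],
--     "t1n": ["T1pre", "T1-pre", "T1SIN", "T1sin"],
--     "t1c": ["T1ce", "T1-ce", "T1post", "T1-post", "T1"],
--     "t2w": ["T2", "t2", "T2-weighted"],
--     "swi": ["SWI", "swi", "Swi", "SUSC"],
--     "dwi": ["DWI", "dwi", "DIFUSION1", "DIFUSION2", "DIFUSION3", "Diffusion"],
--     "adc": ["ADC", "adc"],
--     "ct": ["TC", "Ct", "ct", "TOMOGRAFIA"],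
-- }
--
-- # One flat reverse table built once: each canonical key maps to itself and each
-- # lowercased synonym maps to its canonical key.
-- _EXACT = {}
-- for _key, _synonyms in MODALITY_SYNONYMS.items():
--     _EXACT[_key] = _key
--     for _syn in _synonyms:
--         _EXACT[_syn.lower()] = _key
--
-- # The canonical keys are prefix-free, so "name starts with some key" is decided
-- # by slicing: at most one of name[:3] / name[:2] can be a key.
-- _KEYS3 = frozenset(k for k in MODALITY_SYNONYMS if len(k) == 3)
-- _KEYS2 = frozenset(k for k in MODALITY_SYNONYMS if len(k) == 2)
--
--
-- def _resolve_modality(name: str) -> str: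
--     """Resolve a modality name to its canonical form."""
--     name_lower = name.lower().strip()
--     hit = _EXACT.get(name_lower)
--     if hit is not None:
--         return hit
--     head3 = name_lower[:3]
--     if head3 in _KEYS3:
--         return head3
--     head2 = name_lower[:2]
--     if head2 in _KEYS2:
--         return head2
--     return name_lower
-- ===== Notes on version B (the rewrite author's own statement) =====
-- stated objective: alternative
-- what changed: Per-call scanning is gone entirely: a flat reverse dict (key->key, lowered synonym->key) built once replaces the key test plus nested synonym loops, and the prefix loop over the 8 keys is replaced by two slice-and-set-membership checks (name_lower[:3] / name_lower[:2]), valid because the canonical keys are prefix-free with lengths 3 and 2.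
import Mathlib
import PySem

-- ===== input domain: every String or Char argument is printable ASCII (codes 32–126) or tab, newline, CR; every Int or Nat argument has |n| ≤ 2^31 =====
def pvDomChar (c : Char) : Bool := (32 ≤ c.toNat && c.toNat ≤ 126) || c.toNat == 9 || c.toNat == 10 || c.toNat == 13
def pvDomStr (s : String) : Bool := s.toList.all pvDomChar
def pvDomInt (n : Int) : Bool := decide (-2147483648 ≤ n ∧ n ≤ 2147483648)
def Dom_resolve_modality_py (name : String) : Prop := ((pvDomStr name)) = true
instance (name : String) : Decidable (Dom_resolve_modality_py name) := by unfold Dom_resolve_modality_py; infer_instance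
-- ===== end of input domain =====

-- B removes all per-call scanning: one precomputed reverse dict replaces A's key test and
-- nested synonym loops, and two slice-and-set-membership checks replace A's prefix loop
-- (sound because the canonical keys are prefix-free, of lengths 3 and 2).

-- ===== PORT A =====
def pvSyns : List (String × List String) :=
  [("t2f", ["FLAIR", "flair", "Flair", "T2-FLAIR", "T2flair"]),
   ("t1n", ["T1pre", "T1-pre", "T1SIN", "T1sin"]),
   ("t1c", ["T1ce", "T1-ce", "T1post", "T1-post", "T1"]),
   ("t2w", ["T2", "t2", "T2-weighted"]),
   ("swi", ["SWI", "swi", "Swi", "SUSC"]),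
   ("dwi", ["DWI", "dwi", "DIFUSION1", "DIFUSION2", "DIFUSION3", "Diffusion"]),
   ("adc", ["ADC", "adc"]),
   ("ct", ["TC", "Ct", "ct", "TOMOGRAFIA"])]

def pvMS : PySem.Dict String (List String) := PySem.Dict.ofList pvSyns

-- inner 'for syn in synonyms: if syn.lower() == name_lower'
def pvSynInner : List String → String → Bool
  | [], _ => false
  | y :: r, nl => if PySem.Str.lower y == nl then true else pvSynInner r nl

-- 'for canonical, synonyms in MODALITY_SYNONYMS.items()'
def pvSynScan : List (String × List String) → String → Option String
  | [], _ => none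
  | (c, syns) :: r, nl => if pvSynInner syns nl then some c else pvSynScan r nl

-- 'for canonical in MODALITY_SYNONYMS: if name_lower.startswith(canonical)'
def pvPrefScanA : List String → String → Option String
  | [], _ => none
  | c :: r, nl => if PySem.Str.startswith nl c then some c else pvPrefScanA r nl

def resolve_modality_py (name : String) : String :=
  let nl := PySem.Str.strip (PySem.Str.lower name)
  if pvMS.contains nl then nl
  else
    match pvSynScan pvMS.items nl with
    | some c => c
    | none =>
      match pvPrefScanA pvMS.keys nl with
      | some c => c
      | none => nl

-- ===== PORT B =====
-- module-level loop building _EXACT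
def pvExact : PySem.Dict String String :=
  pvMS.items.foldl
    (fun d p => p.2.foldl (fun d y => d.insert (PySem.Str.lower y) p.1) (d.insert p.1 p.1))
    PySem.Dict.empty

-- _KEYS3 / _KEYS2: the canonical keys of length 3 resp. 2
def pvKeys3 : PySem.Set String := PySem.Set.ofList (pvMS.keys.filter (fun k => PySem.Str.len k == 3))
def pvKeys2 : PySem.Set String := PySem.Set.ofList (pvMS.keys.filter (fun k => PySem.Str.len k == 2))

def resolve_modality_py_alt (name : String) : String :=
  let nl := PySem.Str.strip (PySem.Str.lower name)
  match pvExact.get? nl with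
  | some c => c
  | none =>
    let h3 := PySem.Str.slice nl none (some 3)
    if pvKeys3.contains h3 then h3
    else
      let h2 := PySem.Str.slice nl none (some 2)
      if pvKeys2.contains h2 then h2 else nl

-- ===== PRECONDITION & SPEC =====
def Spec_resolve_modality_py (name : String) (out : String) : Prop := out = resolve_modality_py_alt name
instance (name : String) (out : String) : Decidable (Spec_resolve_modality_py name out) := by unfold Spec_resolve_modality_py; infer_instance

-- ===== CLAIM (what is proved, stated in full; the proofs are below) =====
def Claim_equal_resolve_modality_py : Prop := ∀ (name : String), Dom_resolve_modality_py name → Spec_resolve_modality_py name (resolve_modality_py name)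

-- ===== LEMMAS AND PROOFS =====

theorem pv_sw (nl p : String) : PySem.Str.startswith nl p = decide (nl.toList.take p.length = p.toList) := by
  have h : (PySem.Str.startswith nl p = true) ↔ nl.toList.take p.length = p.toList := by
    rw [show PySem.Str.startswith nl p = PySem.Chars.startswith nl.toList p.toList from by simp [pysem]]
    rw [PySem.Chars.startswith_iff, ← String.length_toList]
    exact ⟨fun h => (List.prefix_iff_eq_take.mp h).symm, fun h => List.prefix_iff_eq_take.mpr h.symm⟩
  by_cases hp : nl.toList.take p.length = p.toList
  · rw [h.mpr hp]; simp [hp]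
  · have hf : PySem.Str.startswith nl p = false := by
      rw [Bool.eq_false_iff]; exact fun e => hp (h.mp e)
    rw [hf]; simp [hp]

set_option maxRecDepth 8000 in
theorem pv_keys : pvMS.keys = ["t2f", "t1n", "t1c", "t2w", "swi", "dwi", "adc", "ct"] := by decide
set_option maxRecDepth 8000 in
theorem pv_k3 : pvKeys3 = ["t2f", "t1n", "t1c", "t2w", "swi", "dwi", "adc"] := by decide
set_option maxRecDepth 8000 in
theorem pv_k2 : pvKeys2 = ["ct"] := by decide

theorem pv_pref_eq (nl : String) :
    (match pvPrefScanA pvMS.keys nl with | some c => c | none => nl) =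
      (let h3 := PySem.Str.slice nl none (some 3)
       if pvKeys3.contains h3 then h3
       else
         let h2 := PySem.Str.slice nl none (some 2)
         if pvKeys2.contains h2 then h2 else nl) := by
  have h3t : (PySem.Str.slice nl none (some 3)).toList = nl.toList.take 3 := by simp [pysem]
  have h2t : (PySem.Str.slice nl none (some 2)).toList = nl.toList.take 2 := by simp [pysem]
  have htt : nl.toList.take 2 = (nl.toList.take 3).take 2 := by simp [List.take_take]
  have s1 : PySem.Str.startswith nl "t2f" = decide (nl.toList.take 3 = ['t','2','f']) := by
    rw [pv_sw, show ("t2f".length) = 3 from by decide]; rfl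
  have s2 : PySem.Str.startswith nl "t1n" = decide (nl.toList.take 3 = ['t','1','n']) := by
    rw [pv_sw, show ("t1n".length) = 3 from by decide]; rfl
  have s3 : PySem.Str.startswith nl "t1c" = decide (nl.toList.take 3 = ['t','1','c']) := by
    rw [pv_sw, show ("t1c".length) = 3 from by decide]; rfl
  have s4 : PySem.Str.startswith nl "t2w" = decide (nl.toList.take 3 = ['t','2','w']) := by
    rw [pv_sw, show ("t2w".length) = 3 from by decide]; rfl
  have s5 : PySem.Str.startswith nl "swi" = decide (nl.toList.take 3 = ['s','w','i']) := by
    rw [pv_sw, show ("swi".length) = 3 from by decide]; rfl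
  have s6 : PySem.Str.startswith nl "dwi" = decide (nl.toList.take 3 = ['d','w','i']) := by
    rw [pv_sw, show ("dwi".length) = 3 from by decide]; rfl
  have s7 : PySem.Str.startswith nl "adc" = decide (nl.toList.take 3 = ['a','d','c']) := by
    rw [pv_sw, show ("adc".length) = 3 from by decide]; rfl
  have s8 : PySem.Str.startswith nl "ct" = decide (nl.toList.take 2 = ['c','t']) := by
    rw [pv_sw, show ("ct".length) = 2 from by decide]; rfl
  rw [pv_keys]
  simp only [pvPrefScanA, s1, s2, s3, s4, s5, s6, s7, s8, pv_k3, pv_k2]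
  by_cases c1 : nl.toList.take 3 = ['t','2','f']
  · have hh : PySem.Str.slice nl none (some 3) = "t2f" := String.toList_inj.mp (h3t.trans c1)
    simp [c1, hh, PySem.Set.contains]
  by_cases c2 : nl.toList.take 3 = ['t','1','n']
  · have hh : PySem.Str.slice nl none (some 3) = "t1n" := String.toList_inj.mp (h3t.trans c2)
    simp [c2, hh, PySem.Set.contains]
  by_cases c3 : nl.toList.take 3 = ['t','1','c']
  · have hh : PySem.Str.slice nl none (some 3) = "t1c" := String.toList_inj.mp (h3t.trans c3)
    simp [c3, hh, PySem.Set.contains]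
  by_cases c4 : nl.toList.take 3 = ['t','2','w']
  · have hh : PySem.Str.slice nl none (some 3) = "t2w" := String.toList_inj.mp (h3t.trans c4)
    simp [c4, hh, PySem.Set.contains]
  by_cases c5 : nl.toList.take 3 = ['s','w','i']
  · have hh : PySem.Str.slice nl none (some 3) = "swi" := String.toList_inj.mp (h3t.trans c5)
    simp [c5, hh, PySem.Set.contains]
  by_cases c6 : nl.toList.take 3 = ['d','w','i']
  · have hh : PySem.Str.slice nl none (some 3) = "dwi" := String.toList_inj.mp (h3t.trans c6)
    simp [c6, hh, PySem.Set.contains]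
  by_cases c7 : nl.toList.take 3 = ['a','d','c']
  · have hh : PySem.Str.slice nl none (some 3) = "adc" := String.toList_inj.mp (h3t.trans c7)
    simp [c7, hh, PySem.Set.contains]
  -- no 3-char key matches: h3 is not in pvKeys3
  have n3 : ∀ s : String, nl.toList.take 3 ≠ s.toList → PySem.Str.slice nl none (some 3) ≠ s :=
    fun s hne e => hne (by rw [← h3t, e])
  have m3 : PySem.Set.contains (["t2f", "t1n", "t1c", "t2w", "swi", "dwi", "adc"] : List String) (PySem.Str.slice nl none (some 3)) = false := by
    simp [PySem.Set.contains, n3 "t2f" c1, n3 "t1n" c2, n3 "t1c" c3, n3 "t2w" c4, n3 "swi" c5, n3 "dwi" c6, n3 "adc" c7]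
  by_cases c8 : nl.toList.take 2 = ['c','t']
  · have hh : PySem.Str.slice nl none (some 2) = "ct" := String.toList_inj.mp (h2t.trans c8)
    rw [m3]; simp [PySem.Set.contains, c1, c2, c3, c4, c5, c6, c7, c8, hh]
  · have n2 : PySem.Str.slice nl none (some 2) ≠ "ct" := fun e => c8 (by rw [← h2t, e]; rfl)
    rw [m3]; simp [PySem.Set.contains, c1, c2, c3, c4, c5, c6, c7, c8, n2]

set_option maxRecDepth 8000 in
theorem pv_exact_items : pvExact = PySem.Dict.mk [("t2f", "t2f"), ("flair", "t2f"), ("t2-flair", "t2f"), ("t2flair", "t2f"), ("t1n", "t1n"), ("t1pre", "t1n"), ("t1-pre", "t1n"), ("t1sin", "t1n"), ("t1c", "t1c"), ("t1ce", "t1c"), ("t1-ce", "t1c"), ("t1post", "t1c"), ("t1-post", "t1c"), ("t1", "t1c"), ("t2w", "t2w"), ("t2", "t2w"), ("t2-weighted", "t2w"), ("swi", "swi"), ("susc", "swi"), ("dwi", "dwi"), ("difusion1", "dwi"), ("difusion2", "dwi"), ("difusion3", "dwi"), ("diffusion", "dwi"), ("adc", "adc"), ("ct", "ct"), ("tc",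 "ct"), ("tomografia", "ct")] := by decide

set_option maxRecDepth 8000 in
theorem pv_ms_items : pvMS = PySem.Dict.mk pvSyns := by decide

set_option maxRecDepth 8000 in
theorem pv_stage_eq (s : String) :
    (if pvMS.contains s then some s else pvSynScan pvMS.items s) = pvExact.get? s := by
  rw [pv_exact_items, pv_ms_items]
  have l0 : PySem.Str.lower "FLAIR" = "flair" := by decide
  have l1 : PySem.Str.lower "flair" = "flair" := by decide
  have l2 : PySem.Str.lower "Flair" = "flair" := by decide
  have l3 : PySem.Str.lower "T2-FLAIR" = "t2-flair" := by decide
  have l4 : PySem.Str.lower "T2flair" = "t2flair" := by decide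
  have l5 : PySem.Str.lower "T1pre" = "t1pre" := by decide
  have l6 : PySem.Str.lower "T1-pre" = "t1-pre" := by decide
  have l7 : PySem.Str.lower "T1SIN" = "t1sin" := by decide
  have l8 : PySem.Str.lower "T1sin" = "t1sin" := by decide
  have l9 : PySem.Str.lower "T1ce" = "t1ce" := by decide
  have l10 : PySem.Str.lower "T1-ce" = "t1-ce" := by decide
  have l11 : PySem.Str.lower "T1post" = "t1post" := by decide
  have l12 : PySem.Str.lower "T1-post" = "t1-post" := by decide
  have l13 : PySem.Str.lower "T1" = "t1" := by decide
  have l14 : PySem.Str.lower "T2" = "t2" := by decide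
  have l15 : PySem.Str.lower "t2" = "t2" := by decide
  have l16 : PySem.Str.lower "T2-weighted" = "t2-weighted" := by decide
  have l17 : PySem.Str.lower "SWI" = "swi" := by decide
  have l18 : PySem.Str.lower "swi" = "swi" := by decide
  have l19 : PySem.Str.lower "Swi" = "swi" := by decide
  have l20 : PySem.Str.lower "SUSC" = "susc" := by decide
  have l21 : PySem.Str.lower "DWI" = "dwi" := by decide
  have l22 : PySem.Str.lower "dwi" = "dwi" := by decide
  have l23 : PySem.Str.lower "DIFUSION1" = "difusion1" := by decide
  have l24 : PySem.Str.lower "DIFUSION2" = "difusion2" := by decide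
  have l25 : PySem.Str.lower "DIFUSION3" = "difusion3" := by decide
  have l26 : PySem.Str.lower "Diffusion" = "diffusion" := by decide
  have l27 : PySem.Str.lower "ADC" = "adc" := by decide
  have l28 : PySem.Str.lower "adc" = "adc" := by decide
  have l29 : PySem.Str.lower "TC" = "tc" := by decide
  have l30 : PySem.Str.lower "Ct" = "ct" := by decide
  have l31 : PySem.Str.lower "ct" = "ct" := by decide
  have l32 : PySem.Str.lower "TOMOGRAFIA" = "tomografia" := by decide
  by_cases h0 : "t2f" = s
  · subst h0; decide
  by_cases h1 : "flair" = s
  · subst h1; decide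
  by_cases h2 : "t2-flair" = s
  · subst h2; decide
  by_cases h3 : "t2flair" = s
  · subst h3; decide
  by_cases h4 : "t1n" = s
  · subst h4; decide
  by_cases h5 : "t1pre" = s
  · subst h5; decide
  by_cases h6 : "t1-pre" = s
  · subst h6; decide
  by_cases h7 : "t1sin" = s
  · subst h7; decide
  by_cases h8 : "t1c" = s
  · subst h8; decide
  by_cases h9 : "t1ce" = s
  · subst h9; decide
  by_cases h10 : "t1-ce" = s
  · subst h10; decide
  by_cases h11 : "t1post" = s
  · subst h11; decide
  by_cases h12 : "t1-post" = s
  · subst h12; decide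
  by_cases h13 : "t1" = s
  · subst h13; decide
  by_cases h14 : "t2w" = s
  · subst h14; decide
  by_cases h15 : "t2" = s
  · subst h15; decide
  by_cases h16 : "t2-weighted" = s
  · subst h16; decide
  by_cases h17 : "swi" = s
  · subst h17; decide
  by_cases h18 : "susc" = s
  · subst h18; decide
  by_cases h19 : "dwi" = s
  · subst h19; decide
  by_cases h20 : "difusion1" = s
  · subst h20; decide
  by_cases h21 : "difusion2" = s
  · subst h21; decide
  by_cases h22 : "difusion3" = s
  · subst h22; decide
  by_cases h23 : "diffusion" = s
  · subst h23; decide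
  by_cases h24 : "adc" = s
  · subst h24; decide
  by_cases h25 : "ct" = s
  · subst h25; decide
  by_cases h26 : "tc" = s
  · subst h26; decide
  by_cases h27 : "tomografia" = s
  · subst h27; decide
  simp [pvSyns, pvSynScan, pvSynInner, PySem.Dict.contains, PySem.Dict.get?, l0, l1, l2, l3, l4, l5, l6, l7, l8, l9, l10, l11, l12, l13, l14, l15, l16, l17, l18, l19, l20, l21, l22, l23, l24, l25, l26, l27, l28, l29, l30, l31, l32,
    h0, h1, h2, h3, h4, h5, h6, h7, h8, h9, h10, h11, h12, h13, h14, h15, h16, h17,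
    h18, h19, h20, h21, h22, h23, h24, h25, h26, h27]

set_option maxRecDepth 8000 in
theorem pv_main (nl : String) :
    (if pvMS.contains nl then nl
     else
       match pvSynScan pvMS.items nl with
       | some c => c
       | none =>
         match pvPrefScanA pvMS.keys nl with
         | some c => c
         | none => nl) =
    (match pvExact.get? nl with
     | some c => c
     | none =>
       let h3 := PySem.Str.slice nl none (some 3)
       if pvKeys3.contains h3 then h3
       else
         let h2 := PySem.Str.slice nl none (some 2)
         if pvKeys2.contains h2 then h2 else nl) := by
  rw [← pv_stage_eq nl]
  by_cases hc : pvMS.contains nl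
  · simp [hc]
  · simp only [hc, Bool.false_eq_true, if_false]
    cases hs : pvSynScan pvMS.items nl with
    | some c => simp
    | none => simpa using pv_pref_eq nl

-- ===== VERDICT (by name: the statement is the Claim_ definition above) =====
set_option maxRecDepth 20000 in
set_option maxHeartbeats 2000000 in
theorem resolve_modality_py_spec : Claim_equal_resolve_modality_py := by
  intro name _
  show resolve_modality_py name = resolve_modality_py_alt name
  unfold resolve_modality_py resolve_modality_py_alt
  exact pv_main (PySem.Str.strip (PySem.Str.lower name))
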